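-- pv_equiv track=rewrite | github.com/pypi-data/pypi-mirror-389 | packages/gap-mapper/gap_mapper-0.1.0.tar.gz/gap_mapper-0.1.0/gap_mapper/core.py | gapmap
-- ===== SOURCE A (Python) =====
-- def _build_space_map(text: str) -> tuple[str, list[int]]:
--     """
--     Internal helper function.
--     Creates a compacted version of the text and a map of cumulative
--     space counts for each non-space character.
--
--     Returns:
--         tuple[str, list[int]]: (compacted_text, space_map)
--     """
--     compacted_text = []
--     space_map = []
--     space_count = 0
--
--     for char in text:
--         if char.isspace():
--             space_count += 1
--         else:
--             compacted_text.append(char)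
--             space_map.append(space_count)
--
--     return "".join(compacted_text), space_map
--
-- def gapmap(original_text: str, spaced_needle: str) -> tuple[int, int] | None:
--     """
--     Finds a "needle" string (which may contain extra spaces) within the
--     original_text and returns the (start, end) offsets of the match.
--
--     Args:
--         original_text: The full, original text to search within.
--         spaced_needle: The string to search for, which may have
--                        extra spaces inserted.
--
--     Returns:
--         A tuple (start, end) of the match's offsets in the
--         original_text, or None if no match is found.
--     """
--
--     #Build the space map for the original text
--     compacted_original, space_map = _build_space_map(original_text)
--
--     #Compact the needle
--     compacted_needle = "".join(c for c in spaced_needle if not c.isspace())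
--
--     if not compacted_needle:
--         return None  # Cannot search for an empty string
--
--     #Find the compacted match
--     start_index = compacted_original.find(compacted_needle)
--
--     if start_index == -1:
--         return None  # Match not found
--
--     #Adjust offsets using the space map
--     end_index_compacted = start_index + len(compacted_needle)
--
--     original_start = start_index + space_map[start_index]
--
--     last_char_map_index = end_index_compacted - 1
--     original_end = end_index_compacted + space_map[last_char_map_index]
--
--     return (original_start, original_end)
-- ===== SOURCE B (Python) =====
-- def gapmap(original_text, spaced_needle):
--     needle = [c for c in spaced_needle if not c.isspace()]
--     if not needle:
--         return None
--     pairs = [(i, c) for i, c in enumerate(original_text) if not c.isspace()]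
--     m = len(needle)
--     for j in range(len(pairs) - m + 1):
--         if all(pairs[j + k][1] == needle[k] for k in range(m)):
--             return (pairs[j][0], pairs[j + m - 1][0] + 1)
--     return None
-- ===== Notes on version B (the rewrite author's own statement) =====
-- stated objective: alternative
-- what changed: B drops the compacted copy + cumulative-space-count map + str.find of A: it filters enumerate(original_text) into (index,char) pairs once and slides a window over the suffixes of that pair list, reading the original offsets directly off the stored indices instead of reconstructing them with space-count arithmetic.
import Mathlib
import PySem

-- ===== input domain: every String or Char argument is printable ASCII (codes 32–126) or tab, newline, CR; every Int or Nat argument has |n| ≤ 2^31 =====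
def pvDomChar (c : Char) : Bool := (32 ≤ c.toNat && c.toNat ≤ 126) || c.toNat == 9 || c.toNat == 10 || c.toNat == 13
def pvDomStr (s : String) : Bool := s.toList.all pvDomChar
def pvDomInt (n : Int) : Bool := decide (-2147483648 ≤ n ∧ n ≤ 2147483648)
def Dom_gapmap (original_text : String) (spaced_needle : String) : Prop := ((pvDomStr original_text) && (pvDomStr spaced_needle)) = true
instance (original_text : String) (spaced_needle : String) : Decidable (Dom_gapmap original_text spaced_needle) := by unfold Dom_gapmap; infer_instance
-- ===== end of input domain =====

-- B replaces A's compacted copy + cumulative-space-count map + str.find by one filtered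
-- (index, char) pair list with a sliding window over its suffixes (alternative, same cost).

-- ===== PORT A =====
-- _build_space_map: the for-loop over the text (strings are handled as their char lists, the PySem representation)
def pvBuildSpaceMap (text : List Char) : List Char × List Int :=
  let r := text.foldl
    (fun (st : List Char × List Int × Int) c =>
      if PySem.Chars.isspace c then (st.1, st.2.1, st.2.2 + 1)
      else (st.1 ++ [c], st.2.1 ++ [st.2.2], st.2.2))
    ([], [], 0)
  (r.1, r.2.1)

def gapmap (original_text : String) (spaced_needle : String) : Option (Int × Int) :=
  let bm := pvBuildSpaceMap original_text.toList
  let compacted := bm.1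
  let spaceMap := bm.2
  let compactedNeedle := spaced_needle.toList.filter (fun c => !PySem.Chars.isspace c)
  if compactedNeedle = [] then none
  else
    let startIndex : Int := PySem.Chars.find compacted compactedNeedle
    if startIndex = -1 then none
    else
      let endIndexCompacted : Int := startIndex + compactedNeedle.length
      -- space_map[start_index] / space_map[end-1]: in range on this branch, so the default is never used
      let originalStart : Int := startIndex + (PySem.List.pyGet? spaceMap startIndex).getD 0
      let lastCharMapIndex : Int := endIndexCompacted - 1
      let originalEnd : Int := endIndexCompacted + (PySem.List.pyGet? spaceMap lastCharMapIndex).getD 0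
      some (originalStart, originalEnd)

-- ===== PORT B =====
-- the for-j loop of Source B: early return via recursion over the list of candidate starts j;
-- pyGetD's default is never used on reached branches (all indices j+k are in range there)
def pvScanGo (pairs : List (Int × Char)) (needle : List Char) : List Int → Option (Int × Int)
  | [] => none
  | j :: js =>
    if (PySem.List.pyRange 0 needle.length 1).all
        (fun k => (PySem.List.pyGetD pairs (j + k) (0, ' ')).2 == PySem.List.pyGetD needle k ' ') then
      some ((PySem.List.pyGetD pairs j (0, ' ')).1,
            (PySem.List.pyGetD pairs (j + needle.length - 1) (0, ' ')).1 + 1)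
    else pvScanGo pairs needle js

def gapmap_alt (original_text : String) (spaced_needle : String) : Option (Int × Int) :=
  let needle := spaced_needle.toList.filter (fun c => !PySem.Chars.isspace c)
  if needle = [] then none
  else
    let pairs := (PySem.List.enumerate original_text.toList 0).filter (fun p => !PySem.Chars.isspace p.2)
    pvScanGo pairs needle (PySem.List.pyRange 0 ((pairs.length : Int) - needle.length + 1) 1)

-- ===== PRECONDITION & SPEC =====
def Spec_gapmap (original_text : String) (spaced_needle : String) (out : Option (Int × Int)) : Prop := out = gapmap_alt original_text spaced_needle
instance (original_text : String) (spaced_needle : String) (out : Option (Int × Int)) : Decidable (Spec_gapmap original_text spaced_needle out) := by unfold Spec_gapmap; infer_instance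

-- ===== CLAIM (what is proved, stated in full; the proofs are below) =====
def Claim_equal_gapmap : Prop := ∀ (original_text : String) (spaced_needle : String), Dom_gapmap original_text spaced_needle → Spec_gapmap original_text spaced_needle (gapmap original_text spaced_needle)

-- ===== LEMMAS AND PROOFS =====

-- the space-count list A builds, as a structural recursion
def pvM : List Char → Int → List Int
  | [], _ => []
  | c :: t, n => if PySem.Chars.isspace c then pvM t (n + 1) else n :: pvM t n

theorem pvFold_char (t : List Char) : ∀ (cs : List Char) (sm : List Int) (n : Int),
    t.foldl
      (fun (st : List Char × List Int × Int) c =>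
        if PySem.Chars.isspace c then (st.1, st.2.1, st.2.2 + 1)
        else (st.1 ++ [c], st.2.1 ++ [st.2.2], st.2.2))
      (cs, sm, n)
    = (cs ++ t.filter (fun c => !PySem.Chars.isspace c), sm ++ pvM t n,
       n + (t.countP (fun c => PySem.Chars.isspace c) : Int)) := by
  induction t with
  | nil => intro cs sm n; simp [pvM]
  | cons c t ih =>
    intro cs sm n
    by_cases h : PySem.Chars.isspace c = true
    · simp [pvM, h, ih]
      ring
    · simp at h
      simp [pvM, h, ih]

theorem pvBuild_eq (t : List Char) :
    pvBuildSpaceMap t = (t.filter (fun c => !PySem.Chars.isspace c), pvM t 0) := by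
  simp [pvBuildSpaceMap, pvFold_char]

-- map snd of the filtered enumeration is the filtered text
theorem pvMapSnd (t : List Char) : ∀ (k : Int),
    (((PySem.List.enumerate t k).filter (fun p => !PySem.Chars.isspace p.2)).map (fun q => q.2))
    = t.filter (fun c => !PySem.Chars.isspace c) := by
  induction t with
  | nil => intro k; simp [PySem.List.enumerate_nil]
  | cons c t ih =>
    intro k
    by_cases h : PySem.Chars.isspace c = true
    · simp [PySem.List.enumerate_cons, h, ih]
    · simp at h
      simp [PySem.List.enumerate_cons, h, ih]

-- pvM entry j recovers the original index of the j-th non-space char (shifted by k, n)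
theorem pvM_getElem (t : List Char) : ∀ (k n : Int) (j : Nat),
    (pvM t n)[j]?
    = (((PySem.List.enumerate t k).filter (fun p => !PySem.Chars.isspace p.2))[j]?).map
        (fun p => p.1 - k + n - j) := by
  induction t with
  | nil => intro k n j; simp [pvM, PySem.List.enumerate_nil]
  | cons c t ih =>
    intro k n j
    by_cases h : PySem.Chars.isspace c = true
    · simp only [pvM, h, if_true, PySem.List.enumerate_cons, List.filter_cons,
        Bool.not_true, Bool.false_eq_true, if_false]
      rw [ih (k + 1) (n + 1) j]
      have he : (fun p : Int × Char => p.1 - (k + 1) + (n + 1) - (j : Int))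
          = (fun p : Int × Char => p.1 - k + n - (j : Int)) := by funext p; ring
      rw [he]
    · simp only [Bool.not_eq_true] at h
      simp only [pvM, h, Bool.false_eq_true, if_false, PySem.List.enumerate_cons,
        List.filter_cons, Bool.not_false, if_true]
      cases j with
      | zero => simp
      | succ j =>
        simp only [List.getElem?_cons_succ]
        rw [ih (k + 1) n j]
        have he : (fun p : Int × Char => p.1 - (k + 1) + n - (j : Int))
            = (fun p : Int × Char => p.1 - k + n - ((j : Int) + 1)) := by funext p; ring
        rw [he]
        push_cast
        rfl

-- the window test of Source B, characterised as a slice equation (indices in range)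
theorem pvCond (ps : List (Int × Char)) (nd : List Char) (j : Nat)
    (h : j + nd.length ≤ ps.length) :
    ((PySem.List.pyRange 0 nd.length 1).all
        (fun k => (PySem.List.pyGetD ps ((j : Int) + k) (0, ' ')).2 == PySem.List.pyGetD nd k ' ')) = true
    ↔ ((ps.map (fun q => q.2)).drop j).take nd.length = nd := by
  rw [PySem.List.pyRange_one]
  simp only [List.all_map, List.all_eq_true, List.mem_range, Function.comp, zero_add,
    sub_zero, Int.toNat_natCast]
  constructor
  · intro hall
    apply List.ext_getElem
    · simp; omega
    · intro k hk1 hk2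
      have hk : k < nd.length := hk2
      have := hall k hk
      have hc : (j : Int) + (k : Int) = ((j + k : Nat) : Int) := by omega
      rw [hc, PySem.List.pyGetD_natCast, PySem.List.pyGetD_natCast] at this
      rw [List.getD_eq_getElem ps _ (by omega), List.getD_eq_getElem nd _ hk] at this
      simp only [beq_iff_eq] at this
      simp only [List.getElem_take, List.getElem_drop, List.getElem_map]
      rw [← this]
  · intro heq k hk
    have hc : (j : Int) + (k : Int) = ((j + k : Nat) : Int) := by omega
    rw [hc, PySem.List.pyGetD_natCast, PySem.List.pyGetD_natCast]
    rw [List.getD_eq_getElem ps _ (by omega), List.getD_eq_getElem nd _ hk]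
    simp only [beq_iff_eq]
    have := congrArg (fun l => l[k]?) heq
    simp only [List.getElem?_take, List.getElem?_drop] at this
    rw [if_pos hk, List.getElem?_eq_getElem (by simp; omega),
      List.getElem?_eq_getElem hk] at this
    simp only [Option.some.injEq, List.getElem_map] at this
    rw [← this]

theorem pvScanGo_all_false (ps : List (Int × Char)) (nd : List Char) :
    ∀ js : List Int,
    (∀ j ∈ js, ((PySem.List.pyRange 0 nd.length 1).all
        (fun k => (PySem.List.pyGetD ps (j + k) (0, ' ')).2 == PySem.List.pyGetD nd k ' ')) = false) →
    pvScanGo ps nd js = none := by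
  intro js
  induction js with
  | nil => intro _; rfl
  | cons j js ih =>
    intro h
    rw [pvScanGo, if_neg (by rw [h j (by simp)]; simp), ih (fun i hi => h i (by simp [hi]))]

theorem pvScanGo_first (ps : List (Int × Char)) (nd : List Char) :
    ∀ (js₁ : List Int) (j : Int) (js₂ : List Int),
    (∀ i ∈ js₁, ((PySem.List.pyRange 0 nd.length 1).all
        (fun k => (PySem.List.pyGetD ps (i + k) (0, ' ')).2 == PySem.List.pyGetD nd k ' ')) = false) →
    ((PySem.List.pyRange 0 nd.length 1).all
        (fun k => (PySem.List.pyGetD ps (j + k) (0, ' ')).2 == PySem.List.pyGetD nd k ' ')) = true →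
    pvScanGo ps nd (js₁ ++ j :: js₂)
      = some ((PySem.List.pyGetD ps j (0, ' ')).1,
              (PySem.List.pyGetD ps (j + nd.length - 1) (0, ' ')).1 + 1) := by
  intro js₁
  induction js₁ with
  | nil =>
    intro j js₂ _ hj
    rw [List.nil_append, pvScanGo, if_pos hj]
  | cons i js₁ ih =>
    intro j js₂ h1 hj
    rw [List.cons_append, pvScanGo, if_neg (by rw [h1 i (by simp)]; simp),
      ih j js₂ (fun i' hi' => h1 i' (by simp [hi'])) hj]

-- ===== VERDICT (by name: the statement is the Claim_ definition above) =====
theorem gapmap_spec : Claim_equal_gapmap := by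
  intro ot sn _
  unfold Spec_gapmap gapmap gapmap_alt
  rw [pvBuild_eq]
  set t := ot.toList with ht
  set nd := sn.toList.filter (fun c => !PySem.Chars.isspace c) with hnd
  by_cases hne : nd = []
  · simp [hne]
  · simp only [if_neg hne]
    set ps := (PySem.List.enumerate t 0).filter (fun p => !PySem.Chars.isspace p.2) with hps
    have hcp : ps.map (fun q => q.2) = t.filter (fun c => !PySem.Chars.isspace c) := pvMapSnd t 0
    set cp := t.filter (fun c => !PySem.Chars.isspace c) with hcpd
    have hm1 : 1 ≤ nd.length := List.length_pos_iff.mpr hne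
    have hlenps : ps.length = cp.length := by rw [← hcp, List.length_map]
    by_cases hf : PySem.Chars.find cp nd = -1
    · simp only [if_pos hf]
      have hninf : ¬ nd <:+: cp := (PySem.Chars.find_eq_neg_one_iff _ _).mp hf
      rw [pvScanGo_all_false ps nd _ ?_]
      intro j hj
      rw [PySem.List.mem_pyRange_one] at hj
      obtain ⟨hj0, hjb⟩ := hj
      have hje : j = ((j.toNat : Nat) : Int) := by omega
      rw [hje]
      by_contra hcnt
      simp only [Bool.not_eq_false] at hcnt
      rw [pvCond ps nd j.toNat (by omega)] at hcnt
      apply hninf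
      rw [← hcp]
      refine (?_ : nd <+: (ps.map (fun q => q.2)).drop j.toNat).isInfix.trans
        (List.drop_suffix _ _).isInfix
      rw [← hcnt]
      exact List.take_prefix _ _
    · simp only [if_neg hf]
      have hge : 0 ≤ PySem.Chars.find cp nd := by
        have := PySem.Chars.neg_one_le_find (s := cp) (sub := nd); omega
      obtain ⟨hpre, hmin⟩ := PySem.Chars.find_spec (s := cp) (sub := nd) hge
      set fI := PySem.Chars.find cp nd with hfi
      set s := fI.toNat with hs
      have hfl : fI = (s : Int) := by omega
      have hlen : s + nd.length ≤ cp.length := by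
        have h1 := hpre.length_le
        simp only [List.length_drop] at h1
        have h2 : fI ≤ (cp.length : Int) := PySem.Chars.find_le_length cp nd
        omega
      -- split the candidate range at the first match s
      have happ := PySem.List.pyRange_one_append 0 ((s : Int)) ((ps.length : Int) - nd.length + 1)
        (by omega) (by omega)
      have hcons : PySem.List.pyRange ((s : Int)) ((ps.length : Int) - nd.length + 1) 1
          = (s : Int) :: PySem.List.pyRange ((s : Int) + 1) ((ps.length : Int) - nd.length + 1) 1 :=
        PySem.List.pyRange_one_cons (by omega)
      have hsplit : PySem.List.pyRange 0 ((ps.length : Int) - nd.length + 1) 1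
          = PySem.List.pyRange 0 (s : Int) 1
            ++ ((s : Int) :: PySem.List.pyRange ((s : Int) + 1) ((ps.length : Int) - nd.length + 1) 1) := by
        rw [happ, hcons]
      rw [hsplit, pvScanGo_first ps nd _ _ _ ?_ ?_]
      · -- the returned pair equals A's
        have hsm : ∀ (j : Nat) (hj : j < ps.length),
            (PySem.List.pyGet? (pvM t 0) (j : Int)).getD 0 = (ps[j]'hj).1 - j := by
          intro j hj
          rw [PySem.List.pyGet?_natCast, pvM_getElem t 0 0 j, ← hps,
            List.getElem?_eq_getElem hj]
          simp
        have hA1 := hsm s (by omega)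
        have hA2 := hsm (s + nd.length - 1) (by omega)
        have hc2 : (s : Int) + (nd.length : Int) - 1 = ((s + nd.length - 1 : Nat) : Int) := by
          omega
        rw [hfl, hc2, hA1, hA2, PySem.List.pyGetD_natCast, PySem.List.pyGetD_natCast,
          List.getD_eq_getElem ps _ (show s < ps.length by omega),
          List.getD_eq_getElem ps _ (show s + nd.length - 1 < ps.length by omega)]
        simp only [Option.some.injEq, Prod.mk.injEq]
        constructor <;> omega
      · -- every j < s fails the window test (find points at the first occurrence)
        intro j hj
        rw [PySem.List.mem_pyRange_one] at hj
        obtain ⟨hj0, hjb⟩ := hj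
        have hje : j = ((j.toNat : Nat) : Int) := by omega
        rw [hje]
        by_contra hcnt
        simp only [Bool.not_eq_false] at hcnt
        rw [pvCond ps nd j.toNat (by omega)] at hcnt
        apply hmin j.toNat (by omega)
        rw [← hcp, ← hcnt]
        exact List.take_prefix _ _
      · -- the window test succeeds at s
        rw [pvCond ps nd s (by omega), hcp]
        exact (List.prefix_iff_eq_take.mp hpre).symm
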